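-- pv_equiv track=rewrite | github.com/babyworm/SECDED_hmatrix_generator | src/gen_hmatrix.py | _all_vectors_of_weight
-- ===== SOURCE A (Python) =====
-- from itertools import combinations
-- from typing import List, Tuple, Literal
--
-- def _all_vectors_of_weight(r: int, w: int, exclude: set[int]) -> List[int]:
--     out = []
--     for idxs in combinations(range(r), w):
--         v = 0
--         for i in idxs:
--             v |= (1 << i)
--         if v not in exclude:
--             out.append(v)
--     return out
-- ===== SOURCE B (Python) =====
-- def _all_vectors_of_weight(r: int, w: int, exclude: set[int]) -> list[int]:
--     out = []
--     if w < 0: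
--         return out
--     stack = [(0, w, 0)]
--     while stack:
--         start, rem, mask = stack.pop()
--         if rem == 0:
--             if mask not in exclude:
--                 out.append(mask)
--         else:
--             # first index of a rem-subset of start..r-1 can be at most r-rem
--             for i in reversed(range(start, r - rem + 1)):
--                 stack.append((i + 1, rem - 1, mask | (1 << i)))
--     return out
-- ===== Notes on version B (the rewrite author's own statement) =====
-- stated objective: alternative
-- what changed: Replaced the itertools.combinations enumeration with a per-combination OR-loop by a recursive generator rec(start, remaining, mask) that threads the partial bitmask incrementally through ascending bit positions.
import Mathlib
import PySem

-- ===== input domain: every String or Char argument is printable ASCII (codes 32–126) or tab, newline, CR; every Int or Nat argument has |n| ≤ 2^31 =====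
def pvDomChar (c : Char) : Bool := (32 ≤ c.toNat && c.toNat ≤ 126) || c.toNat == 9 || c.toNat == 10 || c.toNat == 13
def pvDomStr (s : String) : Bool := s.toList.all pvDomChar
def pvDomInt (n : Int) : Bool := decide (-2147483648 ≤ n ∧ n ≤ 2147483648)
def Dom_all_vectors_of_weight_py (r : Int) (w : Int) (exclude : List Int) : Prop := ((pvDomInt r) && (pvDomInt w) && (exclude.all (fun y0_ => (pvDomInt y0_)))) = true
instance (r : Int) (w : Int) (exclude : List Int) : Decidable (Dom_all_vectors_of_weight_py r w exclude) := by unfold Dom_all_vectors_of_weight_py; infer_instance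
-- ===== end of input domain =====

-- B replaces itertools.combinations + an inner OR-loop by a recursive generator that
-- threads the partial bitmask incrementally (alternative decomposition, same cost).

-- ===== PORT A =====
-- itertools.combinations(range(r), w) in its lexicographic emission order
def pvCombos : List Int → Nat → List (List Int)
  | _, 0 => [[]]
  | [], _ + 1 => []
  | x :: xs, n + 1 => ((pvCombos xs n).map (fun c => x :: c)) ++ pvCombos xs (n + 1)

def all_vectors_of_weight_py (r : Int) (w : Int) (exclude : List Int) : List Int :=
  (pvCombos (PySem.List.pyRange 0 r 1) w.toNat).foldl
    (fun out idxs =>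
      let v := idxs.foldl (fun v i => PySem.Int.bor v ((1 : Int) <<< (i.toNat : Int))) 0
      if exclude.contains v then out else out ++ [v]) []

-- termination helper for pvLoop, cited in its decreasing_by
theorem pvRangeSumBound (r b : Int) (hb : b ≤ r) : ∀ (k : Nat) (start : Int), (b - start).toNat = k →
    ((PySem.List.pyRange start b 1).map
      (fun i => 2 ^ ((r - (i + 1)).toNat + 1))).sum + 2 ≤ 2 ^ ((r - start).toNat + 1) := by
  intro k
  induction k with
  | zero =>
    intro start h
    have : PySem.List.pyRange start b 1 = [] := by
      simp [PySem.List.pyRange_one, h]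
    have hp : (2:Nat) ≤ 2 ^ ((r - start).toNat + 1) := by
      calc (2:Nat) = 2 ^ 1 := rfl
        _ ≤ 2 ^ ((r - start).toNat + 1) := Nat.pow_le_pow_right (by norm_num) (by omega)
    simp [this]; omega
  | succ k ih =>
    intro start h
    have hlt : start < b := by omega
    rw [PySem.List.pyRange_one_cons hlt]
    have h2 := ih (start + 1) (by omega)
    simp only [List.map_cons, List.sum_cons]
    have he : (r - start).toNat + 1 = ((r - (start + 1)).toNat + 1) + 1 := by omega
    have hp : (2:Nat) ^ ((r - start).toNat + 1) = 2 * 2 ^ ((r - (start + 1)).toNat + 1) := by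
      rw [he]; ring
    omega

theorem pvRangeSumLt (r b start : Int) (hb : b ≤ r) :
    ((PySem.List.pyRange start b 1).map
      (fun i => 2 ^ ((r - (i + 1)).toNat + 1))).sum < 2 ^ ((r - start).toNat + 1) := by
  have := pvRangeSumBound r b hb (b - start).toNat start rfl
  omega

-- ===== PORT B =====
-- the explicit DFS stack loop from Source B; `rem` is a Nat since the stack is only seeded when w ≥ 0.
-- Lean's stack head is Python's stack top (Python pushes the reversed range, so `start` ends on top).
def pvLoop (r : Int) (exclude : List Int) : List (Int × Nat × Int) → List Int → List Int
  | [], out => out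
  | (_start, 0, mask) :: rest, out =>
      pvLoop r exclude rest (if exclude.contains mask then out else out ++ [mask])
  | (start, n + 1, mask) :: rest, out =>
      pvLoop r exclude
        ((PySem.List.pyRange start (r - (n + 1) + 1) 1).map
          (fun i => (i + 1, n, PySem.Int.bor mask ((1 : Int) <<< (i.toNat : Int)))) ++ rest) out
termination_by stack _ => (stack.map (fun e => 2 ^ ((r - e.1).toNat + 1))).sum
decreasing_by
  · simp only [List.map_cons, List.sum_cons]
    have : 0 < 2 ^ ((r - _start).toNat + 1) := Nat.two_pow_pos _
    omega
  · simp only [List.map_append, List.sum_append, List.map_cons, List.sum_cons, List.map_map,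
      Function.comp_def]
    have h := pvRangeSumLt r (r - (↑n + 1) + 1) start (by omega)
    omega

def all_vectors_of_weight_py_alt (r : Int) (w : Int) (exclude : List Int) : List Int :=
  if w < 0 then [] else pvLoop r exclude [(0, w.toNat, 0)] []

-- ===== PRECONDITION & SPEC =====
-- A raises ValueError for w < 0 (combinations with a negative count); Pre_ excludes exactly those inputs.
def Pre_all_vectors_of_weight_py (r : Int) (w : Int) (exclude : List Int) : Prop := 0 ≤ w
instance (r : Int) (w : Int) (exclude : List Int) : Decidable (Pre_all_vectors_of_weight_py r w exclude) := by unfold Pre_all_vectors_of_weight_py; infer_instance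

def pvWitness_all_vectors_of_weight_py : Int × Int × List Int := (4, 2, [3])


def Spec_all_vectors_of_weight_py (r : Int) (w : Int) (exclude : List Int) (out : List Int) : Prop := out = all_vectors_of_weight_py_alt r w exclude
instance (r : Int) (w : Int) (exclude : List Int) (out : List Int) : Decidable (Spec_all_vectors_of_weight_py r w exclude out) := by unfold Spec_all_vectors_of_weight_py; infer_instance

-- ===== CLAIM (what is proved, stated in full; the proofs are below) =====
def Claim_equal_all_vectors_of_weight_py : Prop := ∀ (r : Int) (w : Int) (exclude : List Int), Dom_all_vectors_of_weight_py r w exclude → Pre_all_vectors_of_weight_py r w exclude → Spec_all_vectors_of_weight_py r w exclude (all_vectors_of_weight_py r w exclude)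


-- ===== LEMMAS AND PROOFS =====

-- value of one combination: OR the selected bit positions into mask
def pvVOf (mask : Int) (idxs : List Int) : Int :=
  idxs.foldl (fun v i => PySem.Int.bor v ((1 : Int) <<< (i.toNat : Int))) mask

-- A's outer loop is "map then filter"
theorem pvFoldA (exclude : List Int) :
    ∀ (l : List (List Int)) (acc : List Int),
      l.foldl (fun out idxs =>
        let v := idxs.foldl (fun v i => PySem.Int.bor v ((1 : Int) <<< (i.toNat : Int))) 0
        if exclude.contains v then out else out ++ [v]) acc
      = acc ++ (l.map (pvVOf 0)).filter (fun v => !exclude.contains v) := by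
  intro l
  induction l with
  | nil => intro acc; simp
  | cons a t ih =>
    intro acc
    simp only [List.foldl_cons, List.map_cons, List.filter_cons]
    rw [ih]
    by_cases h : exclude.contains (pvVOf 0 a) <;> simp [pvVOf, h] <;> simp [pvVOf] at h <;> simp [h]

-- pvCombos vanishes when more elements are asked for than the list has
theorem pvCombosNil : ∀ (l : List Int) (n : Nat), l.length < n → pvCombos l n = [] := by
  intro l
  induction l with
  | nil => intro n h; match n, h with | n + 1, _ => rfl
  | cons x xs ih =>
    intro n h
    match n, h with
    | n + 1, h =>
      simp only [pvCombos]
      rw [ih n (by simp at h; omega), ih (n + 1) (by simp at h; omega)]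
      simp

-- first-element expansion of the combinations of a range
theorem pvCombosExpand (r : Int) (n : Nat) :
    ∀ (l : List Int) (start : Int), l = PySem.List.pyRange start r 1 →
      pvCombos l (n + 1)
      = l.flatMap (fun i => (pvCombos (PySem.List.pyRange (i + 1) r 1) n).map (fun c => i :: c)) := by
  intro l
  induction l with
  | nil => intro start _; rfl
  | cons a t ihl =>
    intro start hl
    have hlt : start < r := by
      by_contra hge
      have : PySem.List.pyRange start r 1 = [] := by
        simp [PySem.List.pyRange_one, (by omega : (r - start).toNat = 0)]
      rw [this] at hl; exact absurd hl (by simp)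
    rw [PySem.List.pyRange_one_cons hlt] at hl
    obtain ⟨ha, ht⟩ : a = start ∧ t = PySem.List.pyRange (start + 1) r 1 := by
      injection hl with h1 h2; exact ⟨h1, h2⟩
    subst ha
    simp only [pvCombos, List.flatMap_cons]
    rw [ihl (a + 1) ht, ← ht]

-- the feasibility-bounded expansion used by the stack loop: a first index beyond r - n
-- heads no n-element combination, so the range may stop at r - n
theorem pvCombosExpandTrunc (r : Int) (n : Nat) (start : Int) :
    pvCombos (PySem.List.pyRange start r 1) (n + 1)
    = (PySem.List.pyRange start (r - (↑n + 1) + 1) 1).flatMap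
        (fun i => (pvCombos (PySem.List.pyRange (i + 1) r 1) n).map (fun c => i :: c)) := by
  by_cases hfeas : start ≤ r - (↑n + 1) + 1
  · rw [pvCombosExpand r n (PySem.List.pyRange start r 1) start rfl,
      PySem.List.pyRange_one_append start (r - (↑n + 1) + 1) r hfeas (by omega),
      List.flatMap_append]
    have htail : (PySem.List.pyRange (r - (↑n + 1) + 1) r 1).flatMap
        (fun i => (pvCombos (PySem.List.pyRange (i + 1) r 1) n).map (fun c => i :: c)) = [] := by
      rw [List.flatMap_eq_nil_iff]
      intro i hi
      have hmem := (PySem.List.mem_pyRange_one).mp hi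
      rw [pvCombosNil _ n (by rw [PySem.List.length_pyRange_one]; omega)]
      rfl
    rw [htail, List.append_nil]
  · have h1 : PySem.List.pyRange start (r - (↑n + 1) + 1) 1 = [] := by
      simp [PySem.List.pyRange_one, (by omega : (r - (↑n + 1) + 1 - start).toNat = 0)]
    rw [h1, pvCombosNil _ (n + 1) (by rw [PySem.List.length_pyRange_one]; omega)]
    rfl

-- prefixing an index into a combination ORs its bit into the mask
theorem pvVOfCons (mask a : Int) :
    pvVOf mask ∘ (fun c => a :: c) = pvVOf (PySem.Int.bor mask ((1 : Int) <<< (a.toNat : Int))) := by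
  funext c; simp only [Function.comp_apply]; unfold pvVOf; rw [List.foldl_cons]

-- the stack loop emits, per stack entry, the filtered values of its suffix combinations
theorem pvLoopSpec (r : Int) (exclude : List Int) :
    ∀ (stack : List (Int × Nat × Int)) (out : List Int),
      pvLoop r exclude stack out
      = out ++ stack.flatMap (fun e =>
          ((pvCombos (PySem.List.pyRange e.1 r 1) e.2.1).map (pvVOf e.2.2)).filter
            (fun v => !exclude.contains v)) := by
  intro stack out
  fun_induction pvLoop r exclude stack out with
  | case1 out => simp
  | case2 start mask rest out ih =>
    cases h : exclude.contains mask <;>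
      simp_all [pvCombos, pvVOf, List.append_assoc]
  | case3 start n mask rest out ih =>
    rw [ih]
    rw [List.flatMap_cons, pvCombosExpandTrunc r n start]
    simp only [List.flatMap_append, List.flatMap_map, List.map_flatMap, List.filter_flatMap,
      List.map_map, pvVOfCons]

-- ===== VERDICT (by name: the statement is the Claim_ definition above) =====
theorem all_vectors_of_weight_py_spec : Claim_equal_all_vectors_of_weight_py := by
  intro r w exclude _ hpre
  have hw : ¬ (w < 0) := by unfold Pre_all_vectors_of_weight_py at hpre; omega
  unfold Spec_all_vectors_of_weight_py all_vectors_of_weight_py all_vectors_of_weight_py_alt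
  rw [if_neg hw, pvLoopSpec, pvFoldA exclude (pvCombos (PySem.List.pyRange 0 r 1) w.toNat) []]
  simp
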